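-- pv_equiv track=rewrite | github.com/gregarendse/adventofcode | 2023/11/main.py | expand_image_idx_x
-- ===== SOURCE A (Python) =====
-- from typing import List, Set, Tuple
--
-- def expand_image_idx_x(image: List[List[str]]) -> List[int]:
--     xs: List[int] = []
--
--     for i in reversed(range(len(image[0]))):
--         expand: bool = True
--         for j in range(len(image)):
--             if image[j][i] != '.':
--                 expand = False
--                 break
--
--         if expand:
--             xs.append(i)
--
--     return xs
-- ===== SOURCE B (Python) =====
-- from typing import List
--
-- def expand_image_idx_x(image: List[List[str]]) -> List[int]:
--     width = len(image[0])
--     non_empty = set()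
--     for row in image:
--         for i in range(width):
--             if row[i] != '.':
--                 non_empty.add(i)
--     return [i for i in reversed(range(width)) if i not in non_empty]
-- ===== Notes on version B (the rewrite author's own statement) =====
-- stated objective: alternative
-- what changed: Replaces the column-major scan with per-column early-break flag by a single row-major pass building a set of non-empty columns, then emits the reversed column range filtered against that set.
-- outside the precondition, e.g. on expand_image_idx_x([['#'], []]): A returns [], B raises IndexError
import Mathlib
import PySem

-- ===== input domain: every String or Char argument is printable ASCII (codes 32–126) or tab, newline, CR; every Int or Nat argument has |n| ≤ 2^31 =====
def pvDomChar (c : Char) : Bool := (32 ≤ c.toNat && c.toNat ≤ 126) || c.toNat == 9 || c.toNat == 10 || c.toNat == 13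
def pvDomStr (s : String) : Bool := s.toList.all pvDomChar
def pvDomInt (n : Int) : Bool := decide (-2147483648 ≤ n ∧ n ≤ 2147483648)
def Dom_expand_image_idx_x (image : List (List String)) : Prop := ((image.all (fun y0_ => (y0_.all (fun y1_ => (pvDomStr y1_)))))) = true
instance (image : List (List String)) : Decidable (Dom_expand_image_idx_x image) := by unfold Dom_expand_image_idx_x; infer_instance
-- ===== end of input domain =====

-- B replaces A's column-major scan (per-column flag with early break) by one row-major pass
-- collecting the set of non-empty columns, then filters the reversed column range against it
-- (objective: alternative decomposition; return value only — neither mutates its argument).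

-- ===== PORT A =====
-- inner loop 'for j in range(len(image)): if image[j][i] != ".": expand=False; break'
-- (List.all has the same early-exit shape; getD is total — exact under Pre_, where every index is in range)
def expand_image_idx_x (image : List (List String)) : List Int :=
  let w := (image.headD []).length
  (List.range w).reverse.foldl
    (fun xs i =>
      if image.all (fun row => row.getD i "" == ".") then xs ++ [(i : Int)] else xs)
    []

-- ===== PORT B =====
def expand_image_idx_x_alt (image : List (List String)) : List Int :=
  let w := (image.headD []).length
  let nonEmpty : PySem.Set Nat :=
    image.foldl
      (fun s row =>
        (List.range w).foldl
          (fun s i => if row.getD i "" != "." then PySem.Set.add s i else s) s)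
      PySem.Set.empty
  ((List.range w).reverse.filter (fun i => !(PySem.Set.contains nonEmpty i))).map
    (fun i => Int.ofNat i)

-- ===== PRECONDITION & SPEC =====
-- Pre_ excludes the empty image (A raises IndexError on image[0]) and ragged images with a row
-- shorter than row 0, where whether A raises or returns depends on where non-dot cells happen to lie.
def Pre_expand_image_idx_x (image : List (List String)) : Prop :=
  image ≠ [] ∧ ∀ row ∈ image, (image.headD []).length ≤ row.length
instance (image : List (List String)) : Decidable (Pre_expand_image_idx_x image) := by
  unfold Pre_expand_image_idx_x; infer_instance

def pvWitness_expand_image_idx_x : List (List String) :=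
  [[".", "#", "."], [".", ".", "."]]

def Spec_expand_image_idx_x (image : List (List String)) (out : List Int) : Prop := out = expand_image_idx_x_alt image
instance (image : List (List String)) (out : List Int) : Decidable (Spec_expand_image_idx_x image out) := by unfold Spec_expand_image_idx_x; infer_instance

-- ===== CLAIM (what is proved, stated in full; the proofs are below) =====
def Claim_equal_expand_image_idx_x : Prop := ∀ (image : List (List String)), Dom_expand_image_idx_x image → Pre_expand_image_idx_x image → Spec_expand_image_idx_x image (expand_image_idx_x image)

-- ===== LEMMAS AND PROOFS =====

-- membership in the inner fold over one row
theorem pv_mem_inner (row : List String) (l : List Nat) (s : List Nat) (x : Nat) :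
    x ∈ l.foldl (fun s i => if row.getD i "" != "." then PySem.Set.add s i else s) s ↔
      x ∈ s ∨ (x ∈ l ∧ row.getD x "" ≠ ".") := by
  induction l generalizing s with
  | nil => simp
  | cons a t ih =>
    simp only [List.foldl_cons, ih, List.mem_cons]
    split_ifs with h
    · simp only [PySem.Set.mem_add]
      constructor
      · rintro (((hs | rfl) | h2))
        · exact Or.inl hs
        · exact Or.inr ⟨Or.inl rfl, by simpa using h⟩
        · exact Or.inr ⟨Or.inr h2.1, h2.2⟩
      · rintro (hs | ⟨(rfl | hm), hne⟩)
        · exact Or.inl (Or.inl hs)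
        · exact Or.inl (Or.inr rfl)
        · exact Or.inr ⟨hm, hne⟩
    · constructor
      · rintro (hs | h2)
        · exact Or.inl hs
        · exact Or.inr ⟨Or.inr h2.1, h2.2⟩
      · rintro (hs | ⟨(rfl | hm), hne⟩)
        · exact Or.inl hs
        · exact absurd (by simpa using hne) (by simpa using h)
        · exact Or.inr ⟨hm, hne⟩

-- membership in the outer fold over all rows
theorem pv_mem_outer (image : List (List String)) (w : Nat) (s : List Nat) (x : Nat) :
    x ∈ image.foldl
        (fun s row => (List.range w).foldl
          (fun s i => if row.getD i "" != "." then PySem.Set.add s i else s) s) s ↔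
      x ∈ s ∨ ∃ row ∈ image, x ∈ List.range w ∧ row.getD x "" ≠ "." := by
  induction image generalizing s with
  | nil => simp
  | cons r t ih =>
    simp only [List.foldl_cons, ih, pv_mem_inner]
    constructor
    · rintro ((hs | h1) | ⟨row, hm, h2⟩)
      · exact Or.inl hs
      · exact Or.inr ⟨r, List.mem_cons_self .., h1⟩
      · exact Or.inr ⟨row, List.mem_cons_of_mem _ hm, h2⟩
    · rintro (hs | ⟨row, hm, h2⟩)
      · exact Or.inl (Or.inl hs)
      · rcases List.mem_cons.mp hm with rfl | hm'
        · exact Or.inl (Or.inr h2)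
        · exact Or.inr ⟨row, hm', h2⟩

-- ===== VERDICT (by name: the statement is the Claim_ definition above) =====
theorem expand_image_idx_x_spec : Claim_equal_expand_image_idx_x := by
  intro image _ _
  unfold Spec_expand_image_idx_x expand_image_idx_x expand_image_idx_x_alt
  simp only []
  rw [PySem.List.foldl_append_if]
  simp only [List.nil_append]
  have hmap : (Nat.cast : Nat → Int) = (fun i => Int.ofNat i) := rfl
  rw [hmap]
  refine congrArg (List.map _) (List.filter_congr ?_)
  intro i hi
  have hiw : i ∈ List.range (image.headD []).length := List.mem_reverse.mp hi
  set S := image.foldl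
      (fun s row => (List.range (image.headD []).length).foldl
        (fun s j => if row.getD j "" != "." then PySem.Set.add s j else s) s)
      PySem.Set.empty with hS
  rcases hA : image.all (fun row => row.getD i "" == ".") with _ | _
  · -- some row is not '.': i is in the set
    rw [List.all_eq_false] at hA
    obtain ⟨row, hm, hne⟩ := hA
    have hmem : i ∈ S := by
      rw [hS, pv_mem_outer]
      exact Or.inr ⟨row, hm, hiw, by simpa using hne⟩
    simpa using hmem
  · -- all rows '.': i not in the set
    simp only [List.all_eq_true, beq_iff_eq] at hA
    have hnot : i ∉ S := by
      rw [hS, pv_mem_outer]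
      rintro (h | ⟨row, hm, _, hne⟩)
      · simp [PySem.Set.empty] at h
      · exact hne (hA row hm)
    simpa using hnot
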